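-- pv_equiv track=rewrite | github.com/jSieber7/ai_assistant | scripts/docs.py | merge_arguments
-- ===== SOURCE A (Python) =====
-- def merge_arguments(default_args, user_args):
--     """Merge default arguments with user arguments, with user args taking precedence"""
--     merged = []
--     default_flags = set()
--
--     # Extract flags from default args (skip values that follow flags)
--     i = 0
--     while i < len(default_args):
--         arg = default_args[i]
--         if arg.startswith("-"):
--             default_flags.add(arg.split("=")[0])  # Handle --flag=value format
--             if i + 1 < len(default_args) and not default_args[i + 1].startswith("-"):
--                 i += 1  # Skip the value
--         i += 1
--
--     # Add user args first (they take precedence)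
--     for arg in user_args:
--         if arg.startswith("-"):
--             # Remove conflicting default flags
--             flag = arg.split("=")[0]
--             if flag in default_flags:
--                 default_flags.remove(flag)
--         merged.append(arg)
--
--     # Add remaining default args that weren't overridden
--     i = 0
--     while i < len(default_args):
--         arg = default_args[i]
--         flag = arg.split("=")[0] if arg.startswith("-") else None
--
--         if flag and flag in default_flags:
--             merged.append(arg)
--             if i + 1 < len(default_args) and not default_args[i + 1].startswith("-"):
--                 merged.append(default_args[i + 1])
--                 i += 1  # Skip the value
--         i += 1
--
--     return merged
-- ===== SOURCE B (Python) =====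
-- def merge_arguments(default_args, user_args):
--     # Parse defaults into (flag, optional value) groups in one pass.
--     groups = []
--     i = 0
--     n = len(default_args)
--     while i < n:
--         a = default_args[i]
--         if a.startswith("-"):
--             if i + 1 < n and not default_args[i + 1].startswith("-"):
--                 groups.append((a, default_args[i + 1]))
--                 i += 2
--             else:
--                 groups.append((a, None))
--                 i += 1
--         else:
--             i += 1
--     user_flags = {a.split("=")[0] for a in user_args if a.startswith("-")}
--     merged = list(user_args)
--     for flag, val in groups:
--         if flag.split("=")[0] not in user_flags:
--             merged.append(flag)
--             if val is not None:
--                 merged.append(val)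
--     return merged
-- ===== Notes on version B (the rewrite author's own statement) =====
-- stated objective: simpler
-- what changed: B parses default_args once into (flag, optional value) groups and emits the non-overridden groups after the user args, replacing A's two index-based skip-scans over default_args and its mutate-the-set precedence bookkeeping.
import Mathlib
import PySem

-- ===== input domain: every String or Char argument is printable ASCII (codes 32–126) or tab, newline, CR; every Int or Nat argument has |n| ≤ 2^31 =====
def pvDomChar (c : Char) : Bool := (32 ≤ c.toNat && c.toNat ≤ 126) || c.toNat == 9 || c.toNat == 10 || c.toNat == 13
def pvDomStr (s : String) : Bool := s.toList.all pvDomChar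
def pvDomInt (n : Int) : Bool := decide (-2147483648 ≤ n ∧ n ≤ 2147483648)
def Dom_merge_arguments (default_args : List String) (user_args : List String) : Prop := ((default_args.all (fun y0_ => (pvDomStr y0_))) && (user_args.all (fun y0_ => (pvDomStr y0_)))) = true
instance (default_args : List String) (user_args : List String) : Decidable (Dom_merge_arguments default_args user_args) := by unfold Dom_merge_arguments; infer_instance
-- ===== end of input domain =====

-- B parses the defaults once into (flag, optional value) groups and emits the non-overridden
-- groups after the user args, replacing A's two skip-scans and mutated flag set (same result, simpler).

-- shared helper: Python's  a.split("=")[0]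
def pvSplit0 (a : String) : String := ((PySem.Str.split? a "=").getD []).headD ""

-- ===== PORT A =====
-- first while-loop of A: collect the default flags, skipping a value after each flag
def pvAFlags : List String → PySem.Set String → PySem.Set String
  | [], s => s
  | [a], s => if PySem.Str.startswith a "-" then PySem.Set.add s (pvSplit0 a) else s
  | a :: b :: rest, s =>
    if PySem.Str.startswith a "-" then
      if PySem.Str.startswith b "-" then pvAFlags (b :: rest) (PySem.Set.add s (pvSplit0 a))
      else pvAFlags rest (PySem.Set.add s (pvSplit0 a))
    else pvAFlags (b :: rest) s

-- third while-loop of A: emit the default args whose flag is still in the set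
def pvAEmit : List String → PySem.Set String → List String
  | [], _ => []
  | [a], s =>
    if PySem.Str.startswith a "-" && PySem.Set.contains s (pvSplit0 a) then [a] else []
  | a :: b :: rest, s =>
    if PySem.Str.startswith a "-" && PySem.Set.contains s (pvSplit0 a) then
      if PySem.Str.startswith b "-" then a :: pvAEmit (b :: rest) s
      else a :: b :: pvAEmit rest s
    else pvAEmit (b :: rest) s

def merge_arguments (default_args : List String) (user_args : List String) : List String :=
  let default_flags := pvAFlags default_args PySem.Set.empty
  -- user loop: append each user arg, removing its flag from the set when present
  let st := user_args.foldl
    (fun (st : List String × PySem.Set String) arg =>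
      let flags :=
        if PySem.Str.startswith arg "-" then
          if PySem.Set.contains st.2 (pvSplit0 arg) then PySem.Set.discard st.2 (pvSplit0 arg)
          else st.2
        else st.2
      (st.1 ++ [arg], flags))
    (([] : List String), default_flags)
  st.1 ++ pvAEmit default_args st.2

-- ===== PORT B =====
-- one parsing pass: each flag with the immediately following non-flag arg as its value
def pvGroups : List String → List (String × Option String)
  | [] => []
  | [a] => if PySem.Str.startswith a "-" then [(a, none)] else []
  | a :: b :: rest =>
    if PySem.Str.startswith a "-" then
      if PySem.Str.startswith b "-" then (a, none) :: pvGroups (b :: rest)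
      else (a, some b) :: pvGroups rest
    else pvGroups (b :: rest)

def merge_arguments_alt (default_args : List String) (user_args : List String) : List String :=
  let groups := pvGroups default_args
  let user_flags :=
    PySem.Set.ofList ((user_args.filter (fun a => PySem.Str.startswith a "-")).map pvSplit0)
  user_args ++ groups.foldl
    (fun acc g =>
      if PySem.Set.contains user_flags (pvSplit0 g.1) then acc
      else acc ++ g.1 :: (match g.2 with | some v => [v] | none => []))
    []

-- ===== PRECONDITION & SPEC =====
def Spec_merge_arguments (default_args : List String) (user_args : List String) (out : List String) : Prop := out = merge_arguments_alt default_args user_args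
instance (default_args : List String) (user_args : List String) (out : List String) : Decidable (Spec_merge_arguments default_args user_args out) := by unfold Spec_merge_arguments; infer_instance

-- ===== CLAIM (what is proved, stated in full; the proofs are below) =====
def Claim_equal_merge_arguments : Prop := ∀ (default_args : List String) (user_args : List String), Dom_merge_arguments default_args user_args → Spec_merge_arguments default_args user_args (merge_arguments default_args user_args)

-- ===== LEMMAS AND PROOFS =====

-- A's first scan adds exactly (the split of) B's group flags, in order
theorem pvAFlags_eq_groups (l : List String) (s : PySem.Set String) :
    pvAFlags l s = (pvGroups l).foldl (fun s g => PySem.Set.add s (pvSplit0 g.1)) s := by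
  fun_induction pvAFlags l s with
  | case1 => simp only [pvGroups, List.foldl_nil]
  | case2 a s h => simp only [pvGroups, if_pos h, List.foldl_cons, List.foldl_nil]
  | case3 a s h => simp only [pvGroups, if_neg h, List.foldl_nil]
  | case4 a b rest s ha hb ih => simp only [pvGroups, if_pos ha, if_pos hb, List.foldl_cons, ih]
  | case5 a b rest s ha hb ih => simp only [pvGroups, if_pos ha, if_neg hb, List.foldl_cons, ih]
  | case6 a b rest s ha ih => simp only [pvGroups, if_neg ha, ih]

theorem mem_pvAFlags_empty (l : List String) (x : String) :
    x ∈ pvAFlags l PySem.Set.empty ↔ ∃ g ∈ pvGroups l, x = pvSplit0 g.1 := by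
  rw [pvAFlags_eq_groups]
  simpa [PySem.Set.empty] using PySem.Set.mem_foldl_add (l := pvGroups l)
    (f := fun g => pvSplit0 g.1) (s := []) (y := x)

-- dropping a non-flag head does not change the parse
theorem pvGroups_cons_nonflag (b : String) (rest : List String)
    (hb : ¬ PySem.Str.startswith b "-" = true) : pvGroups (b :: rest) = pvGroups rest := by
  cases rest with
  | nil => simp only [pvGroups, if_neg hb]
  | cons c rest' => simp only [pvGroups, if_neg hb]

-- the user loop appends exactly user_args to merged
theorem userLoop_fst (u : List String) (st : List String × PySem.Set String) :
    (u.foldl (fun (st : List String × PySem.Set String) arg =>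
      let flags :=
        if PySem.Str.startswith arg "-" then
          if PySem.Set.contains st.2 (pvSplit0 arg) then PySem.Set.discard st.2 (pvSplit0 arg)
          else st.2
        else st.2
      (st.1 ++ [arg], flags)) st).1 = st.1 ++ u := by
  induction u generalizing st with
  | nil => simp only [List.foldl_nil, List.append_nil]
  | cons a u ih =>
    simp only [List.foldl_cons]
    rw [ih]
    simp

-- membership after the user loop: still in the start set and not a user flag
theorem userLoop_snd_mem (u : List String) (st : List String × PySem.Set String) (x : String) :
    (x ∈ (u.foldl (fun (st : List String × PySem.Set String) arg =>
      let flags :=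
        if PySem.Str.startswith arg "-" then
          if PySem.Set.contains st.2 (pvSplit0 arg) then PySem.Set.discard st.2 (pvSplit0 arg)
          else st.2
        else st.2
      (st.1 ++ [arg], flags)) st).2) ↔
    x ∈ st.2 ∧ x ∉ (u.filter (fun a => PySem.Str.startswith a "-")).map pvSplit0 := by
  induction u generalizing st with
  | nil => simp
  | cons a u ih =>
    simp only [List.foldl_cons]
    rw [ih]
    by_cases ha : PySem.Str.startswith a "-"
    · by_cases hc : PySem.Set.contains st.2 (pvSplit0 a)
      · simp only [List.filter_cons, ha, if_pos hc, if_true, List.map_cons,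
          PySem.Set.mem_discard, List.mem_cons]
        tauto
      · have hx : x ∈ st.2 → ¬ x = pvSplit0 a := fun hm he =>
          hc ((PySem.Set.contains_iff st.2 (pvSplit0 a)).mpr (he ▸ hm))
        simp only [List.filter_cons, ha, if_neg hc, if_true, List.map_cons,
          List.mem_cons]
        tauto
    · have ha' : PySem.Str.startswith a "-" = false := by simpa using ha
      simp only [List.filter_cons, ha', Bool.false_eq_true, if_false]

-- A's emission scan is B's group emission, filtered by the same set membership
theorem pvAEmit_eq_groups (l : List String) (s : PySem.Set String) :
    pvAEmit l s =
      ((pvGroups l).filter (fun g => PySem.Set.contains s (pvSplit0 g.1))).flatMap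
        (fun g => g.1 :: (match g.2 with | some v => [v] | none => [])) := by
  fun_induction pvAEmit l s with
  | case1 => simp only [pvGroups, List.filter_nil, List.flatMap_nil]
  | case2 a s h =>
    rw [Bool.and_eq_true] at h
    obtain ⟨h1, h2⟩ := h
    simp only [pvGroups, if_pos h1, List.filter_cons, h2, if_true, List.filter_nil,
      List.flatMap_cons, List.flatMap_nil, List.append_nil]
  | case3 a s h =>
    by_cases h1 : PySem.Str.startswith a "-"
    · have h2 : PySem.Set.contains s (pvSplit0 a) = false := by
        cases hc : PySem.Set.contains s (pvSplit0 a)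
        · rfl
        · exact absurd (by rw [Bool.and_eq_true]; exact ⟨h1, hc⟩) h
      simp only [pvGroups, if_pos h1, List.filter_cons, h2, Bool.false_eq_true, if_false,
        List.filter_nil, List.flatMap_nil]
    · simp only [pvGroups, if_neg h1, List.filter_nil, List.flatMap_nil]
  | case4 a b rest s h hb ih =>
    rw [Bool.and_eq_true] at h
    obtain ⟨h1, h2⟩ := h
    simp only [pvGroups, if_pos h1, if_pos hb, List.filter_cons, h2, if_true,
      List.flatMap_cons, ih]
    rfl
  | case5 a b rest s h hb ih =>
    rw [Bool.and_eq_true] at h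
    obtain ⟨h1, h2⟩ := h
    simp only [pvGroups, if_pos h1, if_neg hb, List.filter_cons, h2, if_true,
      List.flatMap_cons, ih]
    rfl
  | case6 a b rest s h ih =>
    by_cases h1 : PySem.Str.startswith a "-"
    · have h2 : PySem.Set.contains s (pvSplit0 a) = false := by
        cases hc : PySem.Set.contains s (pvSplit0 a)
        · rfl
        · exact absurd (by rw [Bool.and_eq_true]; exact ⟨h1, hc⟩) h
      by_cases hb : PySem.Str.startswith b "-"
      · simp only [pvGroups, if_pos h1, if_pos hb, List.filter_cons, h2, Bool.false_eq_true,
          if_false, ih]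
      · -- b is the skipped value of an overridden flag; A drops it as a standalone non-flag
        rw [ih, pvGroups_cons_nonflag b rest hb]
        simp only [pvGroups, if_pos h1, if_neg hb, List.filter_cons, h2, Bool.false_eq_true,
          if_false]
    · rw [ih]
      simp only [pvGroups, if_neg h1]

-- B's guarded append loop is a filter + flatMap
theorem foldl_skip_if {α β : Type} (l : List α) (p : α → Bool) (f : α → List β) (acc : List β) :
    l.foldl (fun acc x => if p x then acc else acc ++ f x) acc
      = acc ++ (l.filter (fun x => !p x)).flatMap f := by
  induction l generalizing acc with
  | nil => simp
  | cons a l ih =>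
    by_cases hp : p a
    · simp [hp, ih]
    · simp [hp, ih]

-- ===== VERDICT (by name: the statement is the Claim_ definition above) =====
theorem merge_arguments_spec : Claim_equal_merge_arguments := by
  unfold Claim_equal_merge_arguments
  intro d u _
  unfold Spec_merge_arguments merge_arguments merge_arguments_alt
  dsimp only
  rw [userLoop_fst]
  rw [foldl_skip_if, pvAEmit_eq_groups]
  simp only [List.nil_append]
  congr 1
  congr 1
  apply List.filter_congr
  intro g hg
  have hin : pvSplit0 g.1 ∈ pvAFlags d PySem.Set.empty :=
    (mem_pvAFlags_empty d (pvSplit0 g.1)).mpr ⟨g, hg, rfl⟩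
  have hrem := userLoop_snd_mem u (([] : List String), pvAFlags d PySem.Set.empty) (pvSplit0 g.1)
  have hin' : pvSplit0 g.1 ∈ pvAFlags d [] := hin
  rw [Bool.eq_iff_iff, PySem.Set.contains_iff, hrem]
  simp [hin', PySem.Set.mem_ofList]
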